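-- pv_equiv track=rewrite | github.com/bradcownden/TTF | recursiontools.py | vals
-- ===== SOURCE A (Python) =====
-- def vals(L):
--     x=[]
--     for i in range(L,-1,-1):
--         for j in range(L-i,-1,-1):
--             if i+j<= L and i>=j:
--                 for k in range(L-i-j,-1,-1):
--                     if i+j+k <= L and j>=k:
--                         for l in range(L-i-j-k,-1,-1):
--                             if i+j+k+l == L and k >=l:
--                                 x.append([i,j,k,l])
--     return x
-- ===== SOURCE B (Python) =====
-- def vals(L):
--     out = []
--     for i in range(L, -1, -1):
--         for j in range(min(i, L - i), -1, -1):
--             r = L - i - j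
--             for k in range(min(j, r), (r + 1) // 2 - 1, -1):
--                 out.append([i, j, k, r - k])
--     return out
-- ===== Notes on version B (the rewrite author's own statement) =====
-- stated objective: faster
-- what changed: B drops A's two filter conditions per level and the entire innermost l-loop: loop bounds use min and ceiling division so every iteration emits a tuple, with the last part computed directly as L-i-j-k.
import Mathlib
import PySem

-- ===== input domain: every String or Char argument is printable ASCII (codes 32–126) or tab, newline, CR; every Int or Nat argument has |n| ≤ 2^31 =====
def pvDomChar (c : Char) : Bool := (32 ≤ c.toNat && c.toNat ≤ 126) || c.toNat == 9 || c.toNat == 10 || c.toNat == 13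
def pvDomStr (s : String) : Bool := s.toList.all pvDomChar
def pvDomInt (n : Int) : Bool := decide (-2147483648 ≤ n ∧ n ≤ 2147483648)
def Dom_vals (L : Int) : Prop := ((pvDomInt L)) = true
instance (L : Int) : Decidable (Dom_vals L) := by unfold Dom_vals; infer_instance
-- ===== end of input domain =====

-- B replaces A's four nested filtered loops by three loops whose bounds (min / ceiling
-- division) already enforce the filters, computing the last part directly: an
-- asymptotically faster (O(L^3) vs O(L^4)) exact re-implementation.

-- ===== PORT A =====
def vals (L : Int) : List (List Int) :=
  (PySem.List.pyRange L (-1) (-1)).foldl (fun x i =>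
    (PySem.List.pyRange (L - i) (-1) (-1)).foldl (fun x j =>
      if i + j ≤ L ∧ i ≥ j then
        (PySem.List.pyRange (L - i - j) (-1) (-1)).foldl (fun x k =>
          if i + j + k ≤ L ∧ j ≥ k then
            (PySem.List.pyRange (L - i - j - k) (-1) (-1)).foldl (fun x l =>
              if i + j + k + l = L ∧ k ≥ l then x ++ [[i, j, k, l]] else x) x
          else x) x
      else x) x) []

-- ===== PORT B =====
def vals_alt (L : Int) : List (List Int) :=
  (PySem.List.pyRange L (-1) (-1)).foldl (fun out i =>
    (PySem.List.pyRange (min i (L - i)) (-1) (-1)).foldl (fun out j =>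
      let r := L - i - j
      (PySem.List.pyRange (min j r) (PySem.Int.floordiv (r + 1) 2 - 1) (-1)).foldl
        (fun out k => out ++ [[i, j, k, r - k]]) out) out) []

-- ===== PRECONDITION & SPEC =====
def Spec_vals (L : Int) (out : List (List Int)) : Prop := out = vals_alt L
instance (L : Int) (out : List (List Int)) : Decidable (Spec_vals L out) := by unfold Spec_vals; infer_instance

-- ===== CLAIM (what is proved, stated in full; the proofs are below) =====
def Claim_equal_vals : Prop := ∀ (L : Int), Dom_vals L → Spec_vals L (vals L)

-- ===== LEMMAS AND PROOFS =====

-- 'if p(a): out += g(a)' inside a fold, as a flatMap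
theorem foldl_if_extend {β : Type} (p : Int → Prop) [DecidablePred p] (g : Int → List β)
    (l : List Int) (acc : List β) :
    l.foldl (fun x a => if p a then x ++ g a else x) acc
      = acc ++ l.flatMap (fun a => if p a then g a else []) := by
  have h : (fun (x : List β) a => if p a then x ++ g a else x)
      = (fun x a => x ++ if p a then g a else []) := by
    funext x a; split <;> simp
  rw [h, PySem.List.foldl_append_eq_flatMap]

-- a countdown range filtered by an upper bound m and a lower bound q (0 ≤ q) is the
-- countdown range from min a m down to q
theorem flatMap_countdown_filter (g : Int → List (List Int)) (m q : Int) (hq : 0 ≤ q) :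
    ∀ (n : Nat) (a : Int), a + 1 ≤ (n : Int) →
      (PySem.List.pyRange a (-1) (-1)).flatMap (fun k => if k ≤ m ∧ q ≤ k then g k else [])
        = (PySem.List.pyRange (min a m) (q - 1) (-1)).flatMap g := by
  intro n
  induction n with
  | zero =>
    intro a ha
    rw [PySem.List.pyRange_neg_one_eq_nil (by omega),
        PySem.List.pyRange_neg_one_eq_nil (by omega), List.flatMap_nil, List.flatMap_nil]
  | succ n ih =>
    intro a ha
    by_cases h0 : a ≤ -1
    · rw [PySem.List.pyRange_neg_one_eq_nil (by omega),
          PySem.List.pyRange_neg_one_eq_nil (by omega), List.flatMap_nil, List.flatMap_nil]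
    · rw [PySem.List.pyRange_neg_one_cons (by omega), List.flatMap_cons]
      by_cases h1 : a ≤ m
      · have hmin : min a m = a := min_eq_left h1
        have hmin' : min (a - 1) m = a - 1 := min_eq_left (by omega)
        rw [hmin]
        by_cases h2 : q ≤ a
        · rw [if_pos ⟨h1, h2⟩, PySem.List.pyRange_neg_one_cons (show q - 1 < a by omega),
              ih (a - 1) (by omega), hmin', List.flatMap_cons]
        · rw [if_neg (by omega), ih (a - 1) (by omega), hmin',
              PySem.List.pyRange_neg_one_eq_nil (show a ≤ q - 1 by omega),
              PySem.List.pyRange_neg_one_eq_nil (show a - 1 ≤ q - 1 by omega), List.nil_append]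
      · have hmin : min a m = m := min_eq_right (by omega)
        have hmin' : min (a - 1) m = m := min_eq_right (by omega)
        rw [if_neg (by omega), ih (a - 1) (by omega), hmin, hmin', List.nil_append]

-- only the first element of a countdown range can satisfy 'l = c'
theorem flatMap_countdown_first (h : Int → List (List Int)) (k c : Int) (hc : 0 ≤ c) :
    (PySem.List.pyRange c (-1) (-1)).flatMap (fun l => if l = c ∧ l ≤ k then h l else [])
      = if c ≤ k then h c else [] := by
  rw [PySem.List.pyRange_neg_one_cons (by omega), List.flatMap_cons]
  have htail : (PySem.List.pyRange (c - 1) (-1) (-1)).flatMap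
      (fun l => if l = c ∧ l ≤ k then h l else []) = [] := by
    rw [List.flatMap_congr (g := fun _ => ([] : List (List Int)))
      (by intro l hl
          have := (PySem.List.mem_pyRange_neg_one).mp hl
          rw [if_neg (by omega)])]
    simp
  rw [htail, List.append_nil]
  by_cases hck : c ≤ k
  · rw [if_pos ⟨rfl, hck⟩, if_pos hck]
  · rw [if_neg (by omega), if_neg hck]

-- the k level: A's filtered k loop with its degenerate l loop equals B's bounded k loop
theorem level_k (L i j : Int) (hjLi : j ≤ L - i) :
    List.flatMap
      (fun k => if i + j + k ≤ L ∧ j ≥ k then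
          List.flatMap (fun l => if i + j + k + l = L ∧ k ≥ l then [[i, j, k, l]] else [])
            (PySem.List.pyRange (L - i - j - k) (-1) (-1))
        else [])
      (PySem.List.pyRange (L - i - j) (-1) (-1))
    = List.flatMap (fun k => [[i, j, k, L - i - j - k]])
        (PySem.List.pyRange (min j (L - i - j)) (PySem.Int.floordiv (L - i - j + 1) 2 - 1)
          (-1)) := by
  have hq : ∀ k : Int, (PySem.Int.floordiv (L - i - j + 1) 2 ≤ k ↔ L - i - j - k ≤ k) := by
    intro k
    have h2 := PySem.Int.floordiv_lt_iff_lt_mul (a := L - i - j + 1) (b := 2) (q := k + 1)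
      (by omega)
    omega
  trans (List.flatMap
      (fun k => if k ≤ j ∧ PySem.Int.floordiv (L - i - j + 1) 2 ≤ k then
          [[i, j, k, L - i - j - k]] else [])
      (PySem.List.pyRange (L - i - j) (-1) (-1)))
  · apply List.flatMap_congr
    intro k hk
    obtain ⟨hk0, hkr⟩ := (PySem.List.mem_pyRange_neg_one).mp hk
    have hfirst : List.flatMap
        (fun l => if i + j + k + l = L ∧ k ≥ l then [[i, j, k, l]] else [])
        (PySem.List.pyRange (L - i - j - k) (-1) (-1))
        = if L - i - j - k ≤ k then [[i, j, k, L - i - j - k]] else [] := by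
      rw [← flatMap_countdown_first (fun l => [[i, j, k, l]]) k (L - i - j - k) (by omega)]
      apply List.flatMap_congr
      intro l hl
      obtain ⟨hl0, hlc⟩ := (PySem.List.mem_pyRange_neg_one).mp hl
      split_ifs with h1 h2
      · have hleq : l = L - i - j - k := by omega
        rw [hleq]
      · exact absurd ⟨by omega, by omega⟩ h2
      · exact absurd ⟨by omega, by omega⟩ h1
      · rfl
    rw [hfirst]
    have hqk := hq k
    split_ifs <;> first | rfl | omega
  · trans (List.flatMap (fun k => [[i, j, k, L - i - j - k]])
        (PySem.List.pyRange (min (L - i - j) j) (PySem.Int.floordiv (L - i - j + 1) 2 - 1)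
          (-1)))
    · apply flatMap_countdown_filter _ j _
        ((PySem.Int.le_floordiv_iff_mul_le (by omega)).mpr (by omega))
        (L - i - j + 1).toNat (L - i - j) (by omega)
    · rw [min_comm]

-- the j level: A's filtered j loop equals B's bounded j loop
theorem level_j (L i : Int) (hiL : i ≤ L) :
    List.flatMap
      (fun j => if i + j ≤ L ∧ i ≥ j then
          List.flatMap
            (fun k => if i + j + k ≤ L ∧ j ≥ k then
                List.flatMap (fun l => if i + j + k + l = L ∧ k ≥ l then [[i, j, k, l]] else [])
                  (PySem.List.pyRange (L - i - j - k) (-1) (-1))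
              else [])
            (PySem.List.pyRange (L - i - j) (-1) (-1))
        else [])
      (PySem.List.pyRange (L - i) (-1) (-1))
    = List.flatMap
        (fun j => List.flatMap (fun k => [[i, j, k, L - i - j - k]])
          (PySem.List.pyRange (min j (L - i - j)) (PySem.Int.floordiv (L - i - j + 1) 2 - 1)
            (-1)))
        (PySem.List.pyRange (min i (L - i)) (-1) (-1)) := by
  trans (List.flatMap
      (fun j => if j ≤ i ∧ 0 ≤ j then
          List.flatMap (fun k => [[i, j, k, L - i - j - k]])
            (PySem.List.pyRange (min j (L - i - j)) (PySem.Int.floordiv (L - i - j + 1) 2 - 1)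
              (-1))
        else [])
      (PySem.List.pyRange (L - i) (-1) (-1)))
  · apply List.flatMap_congr
    intro j hj
    obtain ⟨hj0, hjr⟩ := (PySem.List.mem_pyRange_neg_one).mp hj
    by_cases hcase : j ≤ i
    · rw [if_pos (show i + j ≤ L ∧ i ≥ j by omega), if_pos (show j ≤ i ∧ 0 ≤ j by omega)]
      exact level_k L i j (by omega)
    · rw [if_neg (by omega), if_neg (by omega)]
  · trans (List.flatMap
        (fun j => List.flatMap (fun k => [[i, j, k, L - i - j - k]])
          (PySem.List.pyRange (min j (L - i - j)) (PySem.Int.floordiv (L - i - j + 1) 2 - 1)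
            (-1)))
        (PySem.List.pyRange (min (L - i) i) (0 - 1) (-1)))
    · apply flatMap_countdown_filter _ i 0 le_rfl (L - i + 1).toNat (L - i) (by omega)
    · rw [min_comm]
      norm_num

theorem vals_eq_alt (L : Int) : vals L = vals_alt L := by
  unfold vals vals_alt
  simp only [foldl_if_extend, PySem.List.foldl_append_eq_flatMap, List.nil_append]
  apply List.flatMap_congr
  intro i hi
  obtain ⟨hi0, hiL⟩ := (PySem.List.mem_pyRange_neg_one).mp hi
  exact level_j L i hiL

-- ===== VERDICT (by name: the statement is the Claim_ definition above) =====
theorem vals_spec : Claim_equal_vals := by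
  intro L _
  unfold Spec_vals
  exact vals_eq_alt L
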